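-- pv_equiv track=rewrite | github.com/JIHUNJO123/sat-vocab-app | scripts/integrate_verified_sources.py | cross_validate_words
-- ===== SOURCE A (Python) =====
-- from typing import List, Dict, Set
-- from collections import defaultdict
--
-- def cross_validate_words(all_words: List[Dict]) -> Dict[str, List[Dict]]:
--     """여러 소스의 단어 교차 검증"""
--     # 레벨별로 그룹화
--     level_words = defaultdict(list)
--
--     for word in all_words:
--         level = word.get("level", "N5")
--         if level in ["N5", "N4", "N3", "N2", "N1"]:
--             level_words[level].append(word)
--
--     # 중복 제거 (같은 단어, 같은 레벨)
--     validated = {}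
--     for level in ["N5", "N4", "N3", "N2", "N1"]:
--         seen = set()
--         unique_words = []
--
--         for word in level_words[level]:
--             word_text = word.get("word", "").strip()
--             if not word_text:
--                 continue
--
--             key = (word_text, level)
--             if key not in seen:
--                 unique_words.append(word)
--                 seen.add(key)
--
--         validated[level] = unique_words
--
--     return validated
-- ===== SOURCE B (Python) =====
-- LEVELS = ("N5", "N4", "N3", "N2", "N1")
--
--
-- def cross_validate_words(all_words):
--     """Single pass: pre-initialized level buckets plus one shared seen set."""
--     validated = {level: [] for level in LEVELS}
--     seen = set()
--     for word in all_words: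
--         level = word.get("level", "N5")
--         if level not in LEVELS:
--             continue
--         word_text = word.get("word", "").strip()
--         if not word_text:
--             continue
--         key = (word_text, level)
--         if key not in seen:
--             validated[level].append(word)
--             seen.add(key)
--     return validated
-- ===== Notes on version B (the rewrite author's own statement) =====
-- stated objective: alternative
-- what changed: B replaces A's two-phase group-by-level-then-dedup-per-level with a single pass over all_words that appends into pre-initialized level buckets while maintaining one shared seen set of (word_text, level) keys.
import Mathlib
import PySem

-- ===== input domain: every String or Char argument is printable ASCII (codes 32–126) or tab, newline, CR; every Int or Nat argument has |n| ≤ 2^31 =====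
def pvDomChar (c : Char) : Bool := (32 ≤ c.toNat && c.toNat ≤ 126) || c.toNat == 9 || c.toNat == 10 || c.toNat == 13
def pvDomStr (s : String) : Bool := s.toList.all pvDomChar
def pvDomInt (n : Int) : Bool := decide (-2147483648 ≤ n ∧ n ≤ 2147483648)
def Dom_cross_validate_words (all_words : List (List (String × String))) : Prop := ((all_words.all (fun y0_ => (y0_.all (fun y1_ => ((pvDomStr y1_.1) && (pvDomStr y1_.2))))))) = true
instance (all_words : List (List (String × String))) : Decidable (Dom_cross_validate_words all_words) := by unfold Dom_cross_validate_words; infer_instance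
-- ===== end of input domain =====

-- B replaces A's group-by-level-then-dedup-per-level with a single pass over all_words
-- into pre-initialized level buckets plus one shared seen set (objective: alternative decomposition).

-- ===== PORT A =====
-- word.get(k, dflt) on a Python dict passed as an association list
def pvWordGet (w : List (String × String)) (k dflt : String) : String :=
  PySem.Dict.getD (PySem.Dict.mk w) k dflt

def cross_validate_words (all_words : List (List (String × String))) : List (String × List (List (String × String))) :=
  let level_words : PySem.Dict String (List (List (String × String))) :=
    all_words.foldl (fun d word =>
      let level := pvWordGet word "level" "N5"
      if level ∈ ["N5", "N4", "N3", "N2", "N1"] then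
        d.modify level [] (fun l => l ++ [word])
      else d) PySem.Dict.empty
  let validated : PySem.Dict String (List (List (String × String))) :=
    ["N5", "N4", "N3", "N2", "N1"].foldl (fun v level =>
      let st :=
        (level_words.getD level []).foldl
          (fun (st : PySem.Set (String × String) × List (List (String × String))) word =>
            let word_text := PySem.Str.strip (pvWordGet word "word" "")
            if word_text = "" then st
            else if (word_text, level) ∈ st.1 then st
            else (PySem.Set.add st.1 (word_text, level), st.2 ++ [word]))
          (PySem.Set.empty, [])
      v.insert level st.2) PySem.Dict.empty
  validated.items

-- ===== PORT B =====
def cross_validate_words_alt (all_words : List (List (String × String))) : List (String × List (List (String × String))) :=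
  let final :=
    all_words.foldl (fun (st : PySem.Dict String (List (List (String × String))) × PySem.Set (String × String)) word =>
      let level := pvWordGet word "level" "N5"
      if level ∈ ["N5", "N4", "N3", "N2", "N1"] then
        let word_text := PySem.Str.strip (pvWordGet word "word" "")
        if word_text = "" then st
        else if (word_text, level) ∈ st.2 then st
        else (st.1.modify level [] (fun l => l ++ [word]), PySem.Set.add st.2 (word_text, level))
      else st)
      (PySem.Dict.mk [("N5", []), ("N4", []), ("N3", []), ("N2", []), ("N1", [])], PySem.Set.empty)
  final.1.items

-- ===== PRECONDITION & SPEC =====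
def Spec_cross_validate_words (all_words : List (List (String × String))) (out : List (String × List (List (String × String)))) : Prop := out = cross_validate_words_alt all_words
instance (all_words : List (List (String × String))) (out : List (String × List (List (String × String)))) : Decidable (Spec_cross_validate_words all_words out) := by unfold Spec_cross_validate_words; infer_instance

-- ===== CLAIM (what is proved, stated in full; the proofs are below) =====
def Claim_equal_cross_validate_words : Prop := ∀ (all_words : List (List (String × String))), Dom_cross_validate_words all_words → Spec_cross_validate_words all_words (cross_validate_words all_words)

-- ===== LEMMAS AND PROOFS =====

-- the deduplicated sublist of ws that lands in level L, given already-seen keys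
def pvDed (L : String) (seen : PySem.Set (String × String)) : List (List (String × String)) → List (List (String × String))
  | [] => []
  | w :: ws =>
    if pvWordGet w "level" "N5" = L then
      let t := PySem.Str.strip (pvWordGet w "word" "")
      if t = "" then pvDed L seen ws
      else if (t, L) ∈ seen then pvDed L seen ws
      else w :: pvDed L (PySem.Set.add seen (t, L)) ws
    else pvDed L seen ws

lemma pvDed_cons (L : String) (seen : PySem.Set (String × String)) (w : List (String × String))
    (ws : List (List (String × String))) :
    pvDed L seen (w :: ws) =
      if pvWordGet w "level" "N5" = L then
        if PySem.Str.strip (pvWordGet w "word" "") = "" then pvDed L seen ws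
        else if (PySem.Str.strip (pvWordGet w "word" ""), L) ∈ seen then pvDed L seen ws
        else w :: pvDed L (PySem.Set.add seen (PySem.Str.strip (pvWordGet w "word" ""), L)) ws
      else pvDed L seen ws := rfl

lemma pvDed_congr (L : String) (ws : List (List (String × String))) :
    ∀ (seen seen' : PySem.Set (String × String)),
      (∀ t, (t, L) ∈ seen ↔ (t, L) ∈ seen') → pvDed L seen ws = pvDed L seen' ws := by
  induction ws with
  | nil => intro _ _ _; rfl
  | cons w ws ih =>
    intro seen seen' h
    simp only [pvDed]
    split
    · split
      · exact ih _ _ h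
      · by_cases hm : (PySem.Str.strip (pvWordGet w "word" ""), L) ∈ seen
        · rw [if_pos hm, if_pos ((h _).mp hm)]; exact ih _ _ h
        · rw [if_neg hm, if_neg (fun c => hm ((h _).mpr c))]
          refine congrArg _ (ih _ _ ?_)
          intro t
          simp only [PySem.Set.mem_add]
          exact or_congr (h t) Iff.rfl
    · exact ih _ _ h

lemma pvDed_add_ne (L L' : String) (t0 : String) (seen : PySem.Set (String × String))
    (ws : List (List (String × String))) (h : L' ≠ L) :
    pvDed L (PySem.Set.add seen (t0, L')) ws = pvDed L seen ws := by
  refine pvDed_congr L ws _ _ (fun t => ?_)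
  simp only [PySem.Set.mem_add]
  constructor
  · rintro (hs | he)
    · exact hs
    · exact absurd (congrArg Prod.snd he) (fun c => h c.symm)
  · exact Or.inl

lemma pvDed_cons_ne (L : String) (seen : PySem.Set (String × String)) (w : List (String × String))
    (ws : List (List (String × String))) (h : pvWordGet w "level" "N5" ≠ L) :
    pvDed L seen (w :: ws) = pvDed L seen ws := by
  simp [pvDed, h]

-- A's grouping fold, per level
lemma pvGroupA (L : String) (hL : L ∈ ["N5", "N4", "N3", "N2", "N1"]) :
    ∀ (ws : List (List (String × String))) (d : PySem.Dict String (List (List (String × String)))),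
      (ws.foldl (fun d word =>
          if pvWordGet word "level" "N5" ∈ ["N5", "N4", "N3", "N2", "N1"] then
            d.modify (pvWordGet word "level" "N5") [] (fun l => l ++ [word])
          else d) d).getD L []
        = d.getD L [] ++ ws.filter (fun w => decide (pvWordGet w "level" "N5" = L)) := by
  intro ws
  induction ws with
  | nil => intro d; simp
  | cons w ws ih =>
    intro d
    simp only [List.foldl_cons, List.filter_cons]
    by_cases hin : pvWordGet w "level" "N5" ∈ ["N5", "N4", "N3", "N2", "N1"]
    · rw [if_pos hin, ih]
      by_cases heq : pvWordGet w "level" "N5" = L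
      · simp [heq]
      · rw [PySem.Dict.getD_modify, if_neg (fun h => heq h.symm)]
        simp [heq]
    · have heq : pvWordGet w "level" "N5" ≠ L := fun c => hin (c ▸ hL)
      rw [if_neg hin, ih]
      simp [heq]

-- A's inner dedup fold equals pvDed on a list whose members are all at level L
lemma pvInnerA (L : String) :
    ∀ (g : List (List (String × String))) (seen : PySem.Set (String × String))
      (acc : List (List (String × String))),
      (∀ w ∈ g, pvWordGet w "level" "N5" = L) →
      (g.foldl (fun (st : PySem.Set (String × String) × List (List (String × String))) word =>
          if PySem.Str.strip (pvWordGet word "word" "") = "" then st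
          else if (PySem.Str.strip (pvWordGet word "word" ""), L) ∈ st.1 then st
          else (PySem.Set.add st.1 (PySem.Str.strip (pvWordGet word "word" ""), L), st.2 ++ [word])) (seen, acc)).2
        = acc ++ pvDed L seen g := by
  intro g
  induction g with
  | nil => intro seen acc _; simp [pvDed]
  | cons w ws ih =>
    intro seen acc hall
    have hw : pvWordGet w "level" "N5" = L := hall w (by simp)
    have hws : ∀ w' ∈ ws, pvWordGet w' "level" "N5" = L := fun w' h => hall w' (by simp [h])
    simp only [List.foldl_cons, pvDed, hw]
    by_cases h0 : PySem.Str.strip (pvWordGet w "word" "") = ""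
    · simp only [h0]
      simpa [h0] using ih seen acc hws
    · by_cases hm : (PySem.Str.strip (pvWordGet w "word" ""), L) ∈ seen
      · simp only [if_neg h0, if_pos hm]
        simpa [h0, hm] using ih seen acc hws
      · simp only [if_neg h0, if_neg hm]
        have := ih (PySem.Set.add seen (PySem.Str.strip (pvWordGet w "word" ""), L)) (acc ++ [w]) hws
        simpa [h0, hm] using this

lemma pvDed_filter (L : String) :
    ∀ (ws : List (List (String × String))) (seen : PySem.Set (String × String)),
      pvDed L seen (ws.filter (fun w => decide (pvWordGet w "level" "N5" = L))) = pvDed L seen ws := by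
  intro ws
  induction ws with
  | nil => intro seen; rfl
  | cons w ws ih =>
    intro seen
    by_cases heq : pvWordGet w "level" "N5" = L
    · rw [List.filter_cons, if_pos (by simp [heq]), pvDed_cons, pvDed_cons]
      simp only [heq]
      split_ifs <;> first | exact ih _ | exact congrArg _ (ih _)
    · rw [List.filter_cons, if_neg (by simp [heq]), ih, pvDed_cons_ne L seen w ws heq]

lemma pvDed_cons_skip (L : String) (seen : PySem.Set (String × String)) (w : List (String × String))
    (ws : List (List (String × String)))
    (hsk : PySem.Str.strip (pvWordGet w "word" "") = ""
      ∨ (PySem.Str.strip (pvWordGet w "word" ""), pvWordGet w "level" "N5") ∈ seen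
      ∨ pvWordGet w "level" "N5" ≠ L) :
    pvDed L seen (w :: ws) = pvDed L seen ws := by
  rw [pvDed_cons]
  by_cases h : pvWordGet w "level" "N5" = L
  · rcases hsk with h0 | hm | hne
    · simp [h, h0]
    · rw [h] at hm; simp [h, hm]
    · exact absurd h hne
  · simp [h]

lemma pvDed_cons_new (L : String) (seen : PySem.Set (String × String)) (w : List (String × String))
    (ws : List (List (String × String))) (h : pvWordGet w "level" "N5" = L)
    (h0 : PySem.Str.strip (pvWordGet w "word" "") ≠ "")
    (hm : (PySem.Str.strip (pvWordGet w "word" ""), L) ∉ seen) :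
    pvDed L seen (w :: ws)
      = w :: pvDed L (PySem.Set.add seen (PySem.Str.strip (pvWordGet w "word" ""), L)) ws := by
  rw [pvDed_cons]
  simp [h, h0, hm]

-- B's single pass, with the bucket dict kept in its literal five-key shape
lemma pvBmain :
    ∀ (ws : List (List (String × String))) (a b c d e : List (List (String × String)))
      (seen : PySem.Set (String × String)),
      (ws.foldl (fun (st : PySem.Dict String (List (List (String × String))) × PySem.Set (String × String)) word =>
          if pvWordGet word "level" "N5" ∈ ["N5", "N4", "N3", "N2", "N1"] then
            if PySem.Str.strip (pvWordGet word "word" "") = "" then st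
            else if (PySem.Str.strip (pvWordGet word "word" ""), pvWordGet word "level" "N5") ∈ st.2 then st
            else (st.1.modify (pvWordGet word "level" "N5") [] (fun l => l ++ [word]),
              PySem.Set.add st.2 (PySem.Str.strip (pvWordGet word "word" ""), pvWordGet word "level" "N5"))
          else st)
        (PySem.Dict.mk [("N5", a), ("N4", b), ("N3", c), ("N2", d), ("N1", e)], seen)).1.items
      = [("N5", a ++ pvDed "N5" seen ws), ("N4", b ++ pvDed "N4" seen ws),
         ("N3", c ++ pvDed "N3" seen ws), ("N2", d ++ pvDed "N2" seen ws),
         ("N1", e ++ pvDed "N1" seen ws)] := by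
  intro ws
  induction ws with
  | nil =>
    intro a b c d e seen
    simp [pvDed]
  | cons w ws ih =>
    intro a b c d e seen
    simp only [List.foldl_cons]
    by_cases hin : pvWordGet w "level" "N5" ∈ ["N5", "N4", "N3", "N2", "N1"]
    · rw [if_pos hin]
      by_cases h0 : PySem.Str.strip (pvWordGet w "word" "") = ""
      · rw [if_pos h0, ih,
          pvDed_cons_skip "N5" seen w ws (Or.inl h0), pvDed_cons_skip "N4" seen w ws (Or.inl h0),
          pvDed_cons_skip "N3" seen w ws (Or.inl h0), pvDed_cons_skip "N2" seen w ws (Or.inl h0),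
          pvDed_cons_skip "N1" seen w ws (Or.inl h0)]
      · by_cases hm : (PySem.Str.strip (pvWordGet w "word" ""), pvWordGet w "level" "N5") ∈ seen
        · rw [if_neg h0, if_pos hm, ih,
            pvDed_cons_skip "N5" seen w ws (Or.inr (Or.inl hm)), pvDed_cons_skip "N4" seen w ws (Or.inr (Or.inl hm)),
            pvDed_cons_skip "N3" seen w ws (Or.inr (Or.inl hm)), pvDed_cons_skip "N2" seen w ws (Or.inr (Or.inl hm)),
            pvDed_cons_skip "N1" seen w ws (Or.inr (Or.inl hm))]
        · rw [if_neg h0, if_neg hm]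
          rcases (show pvWordGet w "level" "N5" = "N5" ∨ pvWordGet w "level" "N5" = "N4"
              ∨ pvWordGet w "level" "N5" = "N3" ∨ pvWordGet w "level" "N5" = "N2"
              ∨ pvWordGet w "level" "N5" = "N1" by simpa using hin) with h | h | h | h | h
          · have hm' : (PySem.Str.strip (pvWordGet w "word" ""), "N5") ∉ seen := by rwa [h] at hm
            rw [h, show (PySem.Dict.mk [("N5", a), ("N4", b), ("N3", c), ("N2", d), ("N1", e)]).modify "N5" []
                (fun l => l ++ [w]) = PySem.Dict.mk [("N5", a ++ [w]), ("N4", b), ("N3", c), ("N2", d), ("N1", e)] from rfl,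
              ih, pvDed_cons_new "N5" seen w ws h h0 hm',
              pvDed_add_ne "N4" "N5" _ seen ws (by decide), pvDed_add_ne "N3" "N5" _ seen ws (by decide),
              pvDed_add_ne "N2" "N5" _ seen ws (by decide), pvDed_add_ne "N1" "N5" _ seen ws (by decide),
              pvDed_cons_skip "N4" seen w ws (Or.inr (Or.inr (by simp [h]))),
              pvDed_cons_skip "N3" seen w ws (Or.inr (Or.inr (by simp [h]))),
              pvDed_cons_skip "N2" seen w ws (Or.inr (Or.inr (by simp [h]))),
              pvDed_cons_skip "N1" seen w ws (Or.inr (Or.inr (by simp [h])))]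
            simp
          · have hm' : (PySem.Str.strip (pvWordGet w "word" ""), "N4") ∉ seen := by rwa [h] at hm
            rw [h, show (PySem.Dict.mk [("N5", a), ("N4", b), ("N3", c), ("N2", d), ("N1", e)]).modify "N4" []
                (fun l => l ++ [w]) = PySem.Dict.mk [("N5", a), ("N4", b ++ [w]), ("N3", c), ("N2", d), ("N1", e)] from rfl,
              ih, pvDed_cons_new "N4" seen w ws h h0 hm',
              pvDed_add_ne "N5" "N4" _ seen ws (by decide), pvDed_add_ne "N3" "N4" _ seen ws (by decide),
              pvDed_add_ne "N2" "N4" _ seen ws (by decide), pvDed_add_ne "N1" "N4" _ seen ws (by decide),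
              pvDed_cons_skip "N5" seen w ws (Or.inr (Or.inr (by simp [h]))),
              pvDed_cons_skip "N3" seen w ws (Or.inr (Or.inr (by simp [h]))),
              pvDed_cons_skip "N2" seen w ws (Or.inr (Or.inr (by simp [h]))),
              pvDed_cons_skip "N1" seen w ws (Or.inr (Or.inr (by simp [h])))]
            simp
          · have hm' : (PySem.Str.strip (pvWordGet w "word" ""), "N3") ∉ seen := by rwa [h] at hm
            rw [h, show (PySem.Dict.mk [("N5", a), ("N4", b), ("N3", c), ("N2", d), ("N1", e)]).modify "N3" []
                (fun l => l ++ [w]) = PySem.Dict.mk [("N5", a), ("N4", b), ("N3", c ++ [w]), ("N2", d), ("N1", e)] from rfl,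
              ih, pvDed_cons_new "N3" seen w ws h h0 hm',
              pvDed_add_ne "N5" "N3" _ seen ws (by decide), pvDed_add_ne "N4" "N3" _ seen ws (by decide),
              pvDed_add_ne "N2" "N3" _ seen ws (by decide), pvDed_add_ne "N1" "N3" _ seen ws (by decide),
              pvDed_cons_skip "N5" seen w ws (Or.inr (Or.inr (by simp [h]))),
              pvDed_cons_skip "N4" seen w ws (Or.inr (Or.inr (by simp [h]))),
              pvDed_cons_skip "N2" seen w ws (Or.inr (Or.inr (by simp [h]))),
              pvDed_cons_skip "N1" seen w ws (Or.inr (Or.inr (by simp [h])))]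
            simp
          · have hm' : (PySem.Str.strip (pvWordGet w "word" ""), "N2") ∉ seen := by rwa [h] at hm
            rw [h, show (PySem.Dict.mk [("N5", a), ("N4", b), ("N3", c), ("N2", d), ("N1", e)]).modify "N2" []
                (fun l => l ++ [w]) = PySem.Dict.mk [("N5", a), ("N4", b), ("N3", c), ("N2", d ++ [w]), ("N1", e)] from rfl,
              ih, pvDed_cons_new "N2" seen w ws h h0 hm',
              pvDed_add_ne "N5" "N2" _ seen ws (by decide), pvDed_add_ne "N4" "N2" _ seen ws (by decide),
              pvDed_add_ne "N3" "N2" _ seen ws (by decide), pvDed_add_ne "N1" "N2" _ seen ws (by decide),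
              pvDed_cons_skip "N5" seen w ws (Or.inr (Or.inr (by simp [h]))),
              pvDed_cons_skip "N4" seen w ws (Or.inr (Or.inr (by simp [h]))),
              pvDed_cons_skip "N3" seen w ws (Or.inr (Or.inr (by simp [h]))),
              pvDed_cons_skip "N1" seen w ws (Or.inr (Or.inr (by simp [h])))]
            simp
          · have hm' : (PySem.Str.strip (pvWordGet w "word" ""), "N1") ∉ seen := by rwa [h] at hm
            rw [h, show (PySem.Dict.mk [("N5", a), ("N4", b), ("N3", c), ("N2", d), ("N1", e)]).modify "N1" []
                (fun l => l ++ [w]) = PySem.Dict.mk [("N5", a), ("N4", b), ("N3", c), ("N2", d), ("N1", e ++ [w])] from rfl,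
              ih, pvDed_cons_new "N1" seen w ws h h0 hm',
              pvDed_add_ne "N5" "N1" _ seen ws (by decide), pvDed_add_ne "N4" "N1" _ seen ws (by decide),
              pvDed_add_ne "N3" "N1" _ seen ws (by decide), pvDed_add_ne "N2" "N1" _ seen ws (by decide),
              pvDed_cons_skip "N5" seen w ws (Or.inr (Or.inr (by simp [h]))),
              pvDed_cons_skip "N4" seen w ws (Or.inr (Or.inr (by simp [h]))),
              pvDed_cons_skip "N3" seen w ws (Or.inr (Or.inr (by simp [h]))),
              pvDed_cons_skip "N2" seen w ws (Or.inr (Or.inr (by simp [h])))]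
            simp
    · rw [if_neg hin, ih,
        pvDed_cons_ne "N5" seen w ws (fun h => hin (by simp [h])),
        pvDed_cons_ne "N4" seen w ws (fun h => hin (by simp [h])),
        pvDed_cons_ne "N3" seen w ws (fun h => hin (by simp [h])),
        pvDed_cons_ne "N2" seen w ws (fun h => hin (by simp [h])),
        pvDed_cons_ne "N1" seen w ws (fun h => hin (by simp [h]))]

lemma pvChain (v5 v4 v3 v2 v1 : List (List (String × String))) :
    ((((((PySem.Dict.empty : PySem.Dict String (List (List (String × String)))).insert "N5" v5).insert "N4" v4).insert
        "N3" v3).insert "N2" v2).insert "N1" v1).items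
      = [("N5", v5), ("N4", v4), ("N3", v3), ("N2", v2), ("N1", v1)] := rfl

-- ===== VERDICT (by name: the statement is the Claim_ definition above) =====
theorem cross_validate_words_spec : Claim_equal_cross_validate_words := by
  intro ws _
  unfold Spec_cross_validate_words
  have hcomp : ∀ L, L ∈ (["N5", "N4", "N3", "N2", "N1"] : List String) →
      (((ws.foldl (fun d word =>
          if pvWordGet word "level" "N5" ∈ ["N5", "N4", "N3", "N2", "N1"] then
            d.modify (pvWordGet word "level" "N5") [] (fun l => l ++ [word])
          else d) PySem.Dict.empty).getD L []).foldl
        (fun (st : PySem.Set (String × String) × List (List (String × String))) word =>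
          if PySem.Str.strip (pvWordGet word "word" "") = "" then st
          else if (PySem.Str.strip (pvWordGet word "word" ""), L) ∈ st.1 then st
          else (PySem.Set.add st.1 (PySem.Str.strip (pvWordGet word "word" ""), L), st.2 ++ [word]))
        (PySem.Set.empty, [])).2 = pvDed L PySem.Set.empty ws := by
    intro L hL
    rw [pvGroupA L hL ws PySem.Dict.empty, PySem.Dict.getD_empty, List.nil_append,
      pvInnerA L _ PySem.Set.empty []
        (fun w' hw' => of_decide_eq_true (List.mem_filter.mp hw').2),
      List.nil_append, pvDed_filter]
  have hA : cross_validate_words ws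
      = [("N5", pvDed "N5" PySem.Set.empty ws), ("N4", pvDed "N4" PySem.Set.empty ws),
         ("N3", pvDed "N3" PySem.Set.empty ws), ("N2", pvDed "N2" PySem.Set.empty ws),
         ("N1", pvDed "N1" PySem.Set.empty ws)] := by
    unfold cross_validate_words
    simp only [List.foldl_cons, List.foldl_nil]
    rw [pvChain, hcomp "N5" (by decide), hcomp "N4" (by decide), hcomp "N3" (by decide),
      hcomp "N2" (by decide), hcomp "N1" (by decide)]
  have hB : cross_validate_words_alt ws
      = [("N5", pvDed "N5" PySem.Set.empty ws), ("N4", pvDed "N4" PySem.Set.empty ws),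
         ("N3", pvDed "N3" PySem.Set.empty ws), ("N2", pvDed "N2" PySem.Set.empty ws),
         ("N1", pvDed "N1" PySem.Set.empty ws)] := by
    unfold cross_validate_words_alt
    simpa using pvBmain ws [] [] [] [] [] PySem.Set.empty
  rw [hA, hB]
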